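-- pv_equiv track=rewrite | github.com/illbethere/yml_strategy | branches/Liang1/work_space-main/strategy_0618.py | get_shorter_options
-- ===== SOURCE A (Python) =====
-- def get_shorter_options(option_dict):
--     """过滤重复期权，选择最短的键"""
--     value_groups = {}
--     for key, value in option_dict.items():
--         if value not in value_groups:
--             value_groups[value] = []
--         value_groups[value].append(key)
--
--     filtered_dict = {}
--     for value, keys in value_groups.items():
--         shortest_key = min(keys, key=len)
--         filtered_dict[shortest_key] = value
--
--     return filtered_dict
-- ===== SOURCE B (Python) =====
-- def get_shorter_options(option_dict):
--     """过滤重复期权，选择最短的键"""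
--     best = {}
--     for key, value in option_dict.items():
--         cur = best.get(value)
--         if cur is None or len(key) < len(cur):
--             best[value] = key
--     return {best[value]: value for value in best}
-- ===== Notes on version B (the rewrite author's own statement) =====
-- stated objective: simpler
-- what changed: Replaces A's two-phase group-then-reduce (collect every key per value into lists, then take min(keys, key=len) per group) with one online pass that keeps only the shortest key seen so far per value, emitting the result as a single dict comprehension.
import Mathlib
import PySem

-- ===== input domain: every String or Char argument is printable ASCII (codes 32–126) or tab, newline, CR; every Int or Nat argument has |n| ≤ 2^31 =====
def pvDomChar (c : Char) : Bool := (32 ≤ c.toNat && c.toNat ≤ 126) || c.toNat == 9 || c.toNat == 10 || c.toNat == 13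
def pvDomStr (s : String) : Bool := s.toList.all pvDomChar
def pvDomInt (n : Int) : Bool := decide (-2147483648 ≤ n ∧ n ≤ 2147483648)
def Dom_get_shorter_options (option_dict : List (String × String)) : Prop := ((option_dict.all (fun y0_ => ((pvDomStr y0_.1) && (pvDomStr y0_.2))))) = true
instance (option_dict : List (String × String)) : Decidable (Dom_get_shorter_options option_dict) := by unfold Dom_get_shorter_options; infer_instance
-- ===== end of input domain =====

-- B replaces A's group-then-reduce (collect all keys per value, then min by length) by a single
-- online running-minimum pass keeping the shortest key seen so far per value (objective: simpler).

-- ===== PORT A =====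
def get_shorter_options (option_dict : List (String × String)) : List (String × String) :=
  -- value_groups = {}; for key, value in option_dict.items(): if value not in value_groups:
  --   value_groups[value] = []; value_groups[value].append(key)
  let value_groups : PySem.Dict String (List String) :=
    option_dict.foldl (fun d p =>
      let d := if d.contains p.2 then d else d.insert p.2 ([] : List String)
      d.insert p.2 (d.getD p.2 [] ++ [p.1])) PySem.Dict.empty
  -- filtered_dict = {}; for value, keys in value_groups.items():
  --   filtered_dict[min(keys, key=len)] = value
  let filtered : PySem.Dict String String :=
    value_groups.items.foldl (fun fd q =>
      match PySem.List.min? q.2 (fun k => PySem.Str.len k) with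
      | some sk => fd.insert sk q.1
      | none => fd)   -- unreachable: every group is nonempty (Python's min never sees [])
      PySem.Dict.empty
  filtered.items

-- ===== PORT B =====
def get_shorter_options_alt (option_dict : List (String × String)) : List (String × String) :=
  -- best = {}; for key, value: cur = best.get(value); if cur is None or len(key) < len(cur): best[value] = key
  let best : PySem.Dict String String :=
    option_dict.foldl (fun b p =>
      match b.get? p.2 with
      | none => b.insert p.2 p.1
      | some cur => if PySem.Str.len p.1 < PySem.Str.len cur then b.insert p.2 p.1 else b)
      PySem.Dict.empty
  -- return {best[value]: value for value in best}
  (best.items.foldl (fun fd q => fd.insert q.2 q.1) PySem.Dict.empty).items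

-- ===== PRECONDITION & SPEC =====
def Spec_get_shorter_options (option_dict : List (String × String)) (out : List (String × String)) : Prop := out = get_shorter_options_alt option_dict
instance (option_dict : List (String × String)) (out : List (String × String)) : Decidable (Spec_get_shorter_options option_dict out) := by unfold Spec_get_shorter_options; infer_instance

-- ===== CLAIM (what is proved, stated in full; the proofs are below) =====
def Claim_equal_get_shorter_options : Prop := ∀ (option_dict : List (String × String)), Dom_get_shorter_options option_dict → Spec_get_shorter_options option_dict (get_shorter_options option_dict)


-- ===== LEMMAS AND PROOFS =====

-- step function abbreviations

def istep (d : PySem.Dict String (List String)) (p : String × String) : PySem.Dict String (List String) :=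
  d.insert p.2 (d.getD p.2 [] ++ [p.1])

def bstep (b : PySem.Dict String String) (p : String × String) : PySem.Dict String String :=
  match b.get? p.2 with
  | none => b.insert p.2 p.1
  | some cur => if PySem.Str.len p.1 < PySem.Str.len cur then b.insert p.2 p.1 else b

def ostep (acc : Option String) (k : String) : Option String :=
  match acc with
  | none => some k
  | some m => if k.length < m.length then some k else some m

theorem groupStep_eq (d : PySem.Dict String (List String)) (p : String × String) :
    (let d' := if d.contains p.2 then d else d.insert p.2 ([] : List String)
     d'.insert p.2 (d'.getD p.2 [] ++ [p.1])) = istep d p := by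
  cases hc : d.contains p.2 with
  | true => simp [istep]
  | false =>
    simp only [Bool.false_eq_true, if_false, istep]
    rw [PySem.Dict.getD_insert_self, PySem.Dict.insert_insert_self,
       PySem.Dict.getD_of_not_contains d [] hc]

theorem groups_getD (l : List (String × String)) (d : PySem.Dict String (List String)) (v : String) :
    (l.foldl istep d).getD v [] = d.getD v [] ++ (l.filter (fun p => p.2 == v)).map (·.1) := by
  induction l generalizing d with
  | nil => simp
  | cons p t ih =>
    simp only [List.foldl_cons, ih, List.filter_cons]
    by_cases h : p.2 = v
    · subst h
      simp [istep, PySem.Dict.getD_insert_self]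
    · have h2 : (p.2 == v) = false := by simp [h]
      rw [show istep d p = d.insert p.2 (d.getD p.2 [] ++ [p.1]) from rfl,
         PySem.Dict.getD_insert_of_ne d _ _ (Ne.symm h)]
      simp [h2]

theorem best_get? (l : List (String × String)) (b : PySem.Dict String String) (v : String) :
    (l.foldl bstep b).get? v = ((l.filter (fun p => p.2 == v)).map (·.1)).foldl ostep (b.get? v) := by
  induction l generalizing b with
  | nil => simp
  | cons p t ih =>
    simp only [List.foldl_cons, ih, List.filter_cons]
    by_cases h : p.2 = v
    · subst h
      cases hg : b.get? p.2 with
      | none => simp [bstep, hg, ostep, PySem.Dict.get?_insert_self]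
      | some cur =>
        by_cases hlt : p.1.length < cur.length
        · simp [bstep, hg, ostep, hlt, PySem.Str.len, PySem.Dict.get?_insert_self]
        · simp [bstep, hg, ostep, hlt, PySem.Str.len]
    · have h2 : (p.2 == v) = false := by simp [h]
      have hgv : (bstep b p).get? v = b.get? v := by
        unfold bstep
        cases hg : b.get? p.2 with
        | none => rw [PySem.Dict.get?_insert_of_ne b _ (Ne.symm h)]
        | some cur =>
          by_cases hlt : p.1.length < cur.length
          · simp [hlt, PySem.Str.len, PySem.Dict.get?_insert_of_ne b _ (Ne.symm h)]
          · simp [hlt, PySem.Str.len]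
      simp [h2, hgv]

theorem min?_eq_foldl_ostep (xs : List String) :
    PySem.List.min? xs (fun k => PySem.Str.len k) = xs.foldl ostep none := by
  simp only [PySem.List.min?]
  apply PySem.List.foldl_congr_mem
  intro acc x _
  cases acc <;> simp [ostep, PySem.Str.len]

theorem bstep_keys (b : PySem.Dict String String) (p : String × String) :
    (bstep b p).keys = PySem.Set.add b.keys p.2 := by
  unfold bstep
  cases hg : b.get? p.2 with
  | none =>
    have hc : b.contains p.2 = false := by rw [PySem.Dict.contains_eq_isSome_get?, hg]; rfl
    have hm : p.2 ∉ b.keys := by rw [← PySem.Dict.get?_eq_none_iff_not_mem_keys]; exact hg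
    rw [show (b.insert p.2 p.1).keys = (b.insert p.2 p.1).items.map (·.1) from rfl,
        PySem.Dict.items_insert_of_not_contains b p.1 hc]
    simp [PySem.Set.add, PySem.Set.contains, hm]
    rfl
  | some cur =>
    have hc : b.contains p.2 = true := by rw [PySem.Dict.contains_eq_isSome_get?, hg]; rfl
    have hm : p.2 ∈ b.keys := by
      by_contra hm
      rw [← PySem.Dict.get?_eq_none_iff_not_mem_keys] at hm
      rw [hm] at hg; simp at hg
    have hkeys : (b.insert p.2 p.1).keys = b.keys := by
      rw [show (b.insert p.2 p.1).keys = (b.insert p.2 p.1).items.map (·.1) from rfl,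
          PySem.Dict.items_insert_of_contains b p.1 hc,
          show b.keys = b.items.map (·.1) from rfl, List.map_map]
      apply List.map_congr_left
      intro q hq
      by_cases hqk : q.1 = p.2 <;> simp [hqk]
    have hadd : PySem.Set.add b.keys p.2 = b.keys := by
      simp [PySem.Set.add, PySem.Set.contains, hm]
    by_cases hlt : p.1.length < cur.length <;> simp [hlt, PySem.Str.len, hkeys, hadd]

theorem best_keys (l : List (String × String)) (b : PySem.Dict String String) :
    (l.foldl bstep b).keys = PySem.Set.update b.keys (l.map (·.2)) := by
  induction l generalizing b with
  | nil => rfl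
  | cons p t ih =>
    simp only [List.foldl_cons, ih, bstep_keys, List.map_cons]
    rfl

theorem set_update_nil (xs : List String) :
    PySem.Set.update ([] : PySem.Set String) xs = PySem.Set.ofList xs := by
  rw [PySem.Set.ofList_eq_foldl]; rfl

theorem ports_eq (l : List (String × String)) :
    get_shorter_options l = get_shorter_options_alt l := by
  show ((l.foldl (fun d (p : String × String) =>
      let d' := if d.contains p.2 then d else d.insert p.2 ([] : List String)
      d'.insert p.2 (d'.getD p.2 [] ++ [p.1])) PySem.Dict.empty).items.foldl
        (fun fd q => match PySem.List.min? q.2 (fun k => PySem.Str.len k) with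
          | some sk => fd.insert sk q.1
          | none => fd) PySem.Dict.empty).items
    = ((l.foldl (fun b (p : String × String) =>
      match b.get? p.2 with
      | none => b.insert p.2 p.1
      | some cur => if PySem.Str.len p.1 < PySem.Str.len cur then b.insert p.2 p.1 else b)
        PySem.Dict.empty).items.foldl (fun fd q => fd.insert q.2 q.1) PySem.Dict.empty).items
  have hgroups : l.foldl (fun d (p : String × String) =>
        let d' := if d.contains p.2 then d else d.insert p.2 ([] : List String)
        d'.insert p.2 (d'.getD p.2 [] ++ [p.1])) PySem.Dict.empty
      = l.foldl istep PySem.Dict.empty :=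
    PySem.List.foldl_congr_mem l _ _ PySem.Dict.empty (fun acc x _ => groupStep_eq acc x)
  have hbetafold : l.foldl (fun b (p : String × String) =>
        match b.get? p.2 with
        | none => b.insert p.2 p.1
        | some cur => if PySem.Str.len p.1 < PySem.Str.len cur then b.insert p.2 p.1 else b)
        PySem.Dict.empty = l.foldl bstep PySem.Dict.empty := rfl
  rw [hgroups, hbetafold]
  have hGkeys : (l.foldl istep PySem.Dict.empty).keys = PySem.Set.ofList (l.map (fun p => p.2)) := by
    have h := PySem.Dict.keys_foldl_insert_key (ν := List String) l (fun p : String × String => p.2)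
        (fun d p => d.getD p.2 [] ++ [p.1]) PySem.Dict.empty
    rw [PySem.Dict.keys_empty, set_update_nil] at h
    exact h
  have hGnodup : (l.foldl istep PySem.Dict.empty).keys.Nodup := by
    rw [hGkeys]; exact PySem.Set.nodup_ofList _
  have hBkeys : (l.foldl bstep PySem.Dict.empty).keys = PySem.Set.ofList (l.map (fun p => p.2)) := by
    rw [best_keys, PySem.Dict.keys_empty, set_update_nil]
  have hBnodup : (l.foldl bstep PySem.Dict.empty).keys.Nodup := by
    rw [hBkeys]; exact PySem.Set.nodup_ofList _
  have hGitems : (l.foldl istep PySem.Dict.empty).items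
      = (PySem.Set.ofList (l.map (fun p => p.2))).map
          (fun v => (v, (l.filter (fun p => p.2 == v)).map (·.1))) := by
    rw [PySem.Dict.items_eq_map_keys _ hGnodup [], hGkeys]
    apply List.map_congr_left
    intro v _
    have h := groups_getD l PySem.Dict.empty v
    simp only [PySem.Dict.getD_empty, List.nil_append] at h
    rw [h]
  have hBget : ∀ v, (l.foldl bstep PySem.Dict.empty).get? v
      = PySem.List.min? ((l.filter (fun p => p.2 == v)).map (·.1)) (fun k => PySem.Str.len k) := by
    intro v
    rw [best_get?, PySem.Dict.get?_empty, min?_eq_foldl_ostep]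
  have hBitems : (l.foldl bstep PySem.Dict.empty).items
      = (PySem.Set.ofList (l.map (fun p => p.2))).map
          (fun v => (v, ((l.foldl bstep PySem.Dict.empty).get? v).getD "")) := by
    rw [PySem.Dict.items_eq_map_keys _ hBnodup "", hBkeys]
    apply List.map_congr_left
    intro v _
    rw [PySem.Dict.getD_eq_get?_getD]
  have hne : ∀ v ∈ PySem.Set.ofList (l.map (fun p => p.2)),
      ((l.filter (fun p => p.2 == v)).map (·.1)) ≠ [] := by
    intro v hv
    rw [PySem.Set.mem_ofList] at hv
    obtain ⟨p, hp, rfl⟩ := List.mem_map.mp hv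
    intro hnil
    rw [List.map_eq_nil_iff, List.filter_eq_nil_iff] at hnil
    exact absurd (by simp) (hnil p hp)
  rw [hGitems, hBitems, List.foldl_map, List.foldl_map]
  apply congrArg (fun d : PySem.Dict String String => d.items)
  apply PySem.List.foldl_congr_mem
  intro fd v hv
  cases hm : PySem.List.min? ((l.filter (fun p => p.2 == v)).map (·.1)) (fun k => PySem.Str.len k) with
  | none =>
    exact absurd ((PySem.List.min?_eq_none_iff _ _).mp hm) (hne v hv)
  | some m =>
    show fd.insert m v = fd.insert (((l.foldl bstep PySem.Dict.empty).get? v).getD "") v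
    rw [hBget v, hm]
    rfl

-- ===== VERDICT (by name: the statement is the Claim_ definition above) =====
theorem get_shorter_options_spec : Claim_equal_get_shorter_options := by
  intro l _
  unfold Spec_get_shorter_options
  exact ports_eq l
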